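-- pv_equiv track=rewrite | github.com/alexcrudi/comparador-manual | app_manual.py | generate_unique_codes
-- ===== SOURCE A (Python) =====
-- def generate_unique_codes(base_ids):
--     """Turn base_ids into unique codes by appending -01, -02 for duplicates."""
--     counts = {}
--     for b in base_ids:
--         b = str(b)
--         counts[b] = counts.get(b, 0) + 1
--     seq = {}
--     out = []
--     for b in base_ids:
--         b = str(b)
--         if counts.get(b, 0) <= 1 or b.strip() == "":
--             out.append(b)
--         else:
--             seq[b] = seq.get(b, 0) + 1
--             out.append(f"{b}-{seq[b]:02d}")
--     return out
-- ===== SOURCE B (Python) =====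
-- def generate_unique_codes(base_ids):
--     """Turn base_ids into unique codes by appending -01, -02 for duplicates."""
--     ids = [str(b) for b in base_ids]
--     pos = {}
--     for i, b in enumerate(ids):
--         pos.setdefault(b, []).append(i)
--     out = [None] * len(ids)
--     for key, idxs in pos.items():
--         if len(idxs) == 1 or key.strip() == "":
--             for i in idxs:
--                 out[i] = key
--         else:
--             for n, i in enumerate(idxs, 1):
--                 out[i] = f"{key}-{n:02d}"
--     return out
-- ===== Notes on version B (the rewrite author's own statement) =====
-- stated objective: alternative
-- what changed: B inverts the traversal: one pass builds an index dict mapping each id to the list of positions where it occurs, then the output array is filled group-by-group (raw key for singleton/blank keys, key-NN numbered along the group's ascending positions), instead of A's per-element second scan with a running seq dict.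
import Mathlib
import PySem

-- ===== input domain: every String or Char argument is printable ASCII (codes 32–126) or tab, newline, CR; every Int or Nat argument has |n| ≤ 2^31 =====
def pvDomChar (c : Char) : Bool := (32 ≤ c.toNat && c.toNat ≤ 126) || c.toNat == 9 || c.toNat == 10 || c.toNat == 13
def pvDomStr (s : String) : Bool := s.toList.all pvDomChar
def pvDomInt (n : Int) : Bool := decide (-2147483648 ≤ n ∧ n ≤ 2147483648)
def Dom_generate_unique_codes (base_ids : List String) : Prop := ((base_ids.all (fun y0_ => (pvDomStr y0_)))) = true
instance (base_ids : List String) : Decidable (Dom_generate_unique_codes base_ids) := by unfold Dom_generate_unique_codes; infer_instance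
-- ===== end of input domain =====

-- B inverts the traversal: it groups the positions of each id in one dict pass, then fills the
-- output array group by group, instead of A's per-element second scan with a running seq dict
-- (alternative decomposition, same asymptotic cost).

-- ===== PORT A =====
-- f"{n:02d}": exact for the values both programs format (n ≥ 1)
def pad2 (n : Int) : String :=
  if n < 10 then "0" ++ PySem.Int.toStr n else PySem.Int.toStr n

def generate_unique_codes (base_ids : List String) : List String :=
  -- counts[b] = counts.get(b, 0) + 1   (str(b) is the identity on strings)
  let counts : PySem.Dict String Int :=
    base_ids.foldl (fun d b => d.insert b (d.getD b 0 + 1)) PySem.Dict.empty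
  -- second pass with the seq dict and the out list
  (base_ids.foldl
    (fun (st : PySem.Dict String Int × List String) b =>
      if counts.getD b 0 ≤ 1 ∨ PySem.Str.strip b = "" then
        (st.1, st.2 ++ [b])
      else
        let s := st.1.getD b 0 + 1
        (st.1.insert b s, st.2 ++ [b ++ "-" ++ pad2 s]))
    (PySem.Dict.empty, [])).2

-- ===== PORT B =====
def generate_unique_codes_alt (base_ids : List String) : List String :=
  let ids := base_ids.map (fun b => b)   -- [str(b) for b in base_ids]
  -- pos.setdefault(b, []).append(i)  ==  pos[b] = pos.get(b, []) + [i]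
  let pos : PySem.Dict String (List Int) :=
    (PySem.List.enumerate ids).foldl (fun d p => d.modify p.2 [] (fun l => l ++ [p.1])) PySem.Dict.empty
  let out0 : List (Option String) := List.replicate ids.length none   -- [None] * len(ids)
  let out :=
    pos.items.foldl (fun o kv =>
      if kv.2.length = 1 ∨ PySem.Str.strip kv.1 = "" then
        kv.2.foldl (fun o i => PySem.List.pySetD o i (some kv.1)) o
      else
        (PySem.List.enumerate kv.2 1).foldl
          (fun o p => PySem.List.pySetD o p.2 (some (kv.1 ++ "-" ++ pad2 p.1))) o) out0
  -- every position is written exactly once, so the final list holds no None; extract the strings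
  out.map (fun x => x.getD "")

-- ===== PRECONDITION & SPEC =====
def Spec_generate_unique_codes (base_ids : List String) (out : List String) : Prop := out = generate_unique_codes_alt base_ids
instance (base_ids : List String) (out : List String) : Decidable (Spec_generate_unique_codes base_ids out) := by unfold Spec_generate_unique_codes; infer_instance

-- ===== CLAIM (what is proved, stated in full; the proofs are below) =====
def Claim_equal_generate_unique_codes : Prop := ∀ (base_ids : List String), Dom_generate_unique_codes base_ids → Spec_generate_unique_codes base_ids (generate_unique_codes base_ids)

-- ===== LEMMAS AND PROOFS =====

-- the value A's second loop appends at global position p.1 (p.2 the id there)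
def gElem (L : List String) (p : Int × String) : String :=
  if PySem.List.count L p.2 ≤ 1 ∨ PySem.Str.strip p.2 = "" then p.2
  else p.2 ++ "-" ++ pad2 ((PySem.List.count (PySem.List.slice L none (some (p.1 + 1))) p.2 : Nat) : Int)

-- the same value as a function of the Nat position
def aVal (L : List String) (k : Nat) : String :=
  let b := L.getD k ""
  if L.count b ≤ 1 ∨ PySem.Str.strip b = "" then b
  else b ++ "-" ++ pad2 (((L.take (k + 1)).count b : Nat) : Int)

lemma counts_getD (L : List String) (b : String) :
    (L.foldl (fun d b => d.insert b (d.getD b 0 + 1)) (PySem.Dict.empty : PySem.Dict String Int)).getD b 0 = (L.count b : Int) := by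
  rw [PySem.Dict.getD_foldl_insert_add_one]
  simp [PySem.Dict.getD_empty]

lemma loopA (L : List String) : ∀ (rest pre : List String) (seq : PySem.Dict String Int) (out : List String),
    L = pre ++ rest →
    (∀ b : String, ¬ (L.count b ≤ 1 ∨ PySem.Str.strip b = "") → seq.getD b 0 = (pre.count b : Int)) →
    (rest.foldl
      (fun (st : PySem.Dict String Int × List String) b =>
        if ((L.foldl (fun d b => d.insert b (d.getD b 0 + 1)) (PySem.Dict.empty : PySem.Dict String Int)).getD b 0) ≤ 1 ∨ PySem.Str.strip b = "" then
          (st.1, st.2 ++ [b])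
        else
          let s := st.1.getD b 0 + 1
          (st.1.insert b s, st.2 ++ [b ++ "-" ++ pad2 s]))
      (seq, out)).2
    = out ++ (PySem.List.enumerate rest (pre.length : Int)).map (gElem L) := by
  intro rest
  induction rest with
  | nil => intro pre seq out _ _; simp [PySem.List.enumerate_nil]
  | cons b rest' ih =>
    intro pre seq out hL hinv
    rw [PySem.List.enumerate_cons, List.map_cons]
    have htake : PySem.List.slice L none (some ((pre.length : Int) + 1)) = pre ++ [b] := by
      have h1 : ((pre.length : Int) + 1) = ((pre.length + 1 : Nat) : Int) := by push_cast; ring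
      rw [h1, PySem.List.slice_to_natCast, hL, List.take_append]
      simp
    have hcnt : (L.foldl (fun d b => d.insert b (d.getD b 0 + 1)) (PySem.Dict.empty : PySem.Dict String Int)).getD b 0 = (L.count b : Int) :=
      counts_getD L b
    by_cases hc : L.count b ≤ 1 ∨ PySem.Str.strip b = ""
    · have hcond : ((L.foldl (fun d b => d.insert b (d.getD b 0 + 1)) (PySem.Dict.empty : PySem.Dict String Int)).getD b 0) ≤ (1 : Int) ∨ PySem.Str.strip b = "" := by
        rcases hc with h | h
        · left; rw [hcnt]; exact_mod_cast h
        · right; exact h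
      have hg : gElem L ((pre.length : Int), b) = b := by
        simp only [gElem, PySem.List.count_eq]
        rw [if_pos hc]
      have hstep := ih (pre ++ [b]) seq (out ++ [b]) (by simpa using hL)
        (fun b' hb' => by
          rw [hinv b' hb']
          have hne : b' ≠ b := fun h => hb' (h ▸ hc)
          simp [List.count_append, Ne.symm hne])
      simp only [List.foldl_cons, if_pos hcond]
      rw [hg]
      simp only [List.length_append, List.length_cons, List.length_nil, Nat.cast_add,
        Nat.cast_one] at hstep
      simpa [List.append_assoc] using hstep
    · have hcond : ¬ (((L.foldl (fun d b => d.insert b (d.getD b 0 + 1)) (PySem.Dict.empty : PySem.Dict String Int)).getD b 0) ≤ (1 : Int) ∨ PySem.Str.strip b = "") := by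
        intro h; apply hc
        rcases h with h | h
        · left; rw [hcnt] at h; exact_mod_cast h
        · right; exact h
      have hseqb : seq.getD b 0 = (pre.count b : Int) := hinv b hc
      have hg : gElem L ((pre.length : Int), b) = b ++ "-" ++ pad2 (seq.getD b 0 + 1) := by
        simp only [gElem, PySem.List.count_eq]
        rw [if_neg hc, htake, hseqb]
        have h2 : List.count b (pre ++ [b]) = List.count b pre + 1 := by
          simp [List.count_append]
        rw [h2]; push_cast; ring_nf
      have hstep := ih (pre ++ [b]) (seq.insert b (seq.getD b 0 + 1)) (out ++ [b ++ "-" ++ pad2 (seq.getD b 0 + 1)])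
        (by simpa using hL)
        (fun b' hb' => by
          rw [PySem.Dict.getD_insert]
          by_cases he : b' = b
          · subst he
            rw [if_pos rfl, hseqb]
            simp [List.count_append]
          · rw [if_neg he, hinv b' hb']
            simp [List.count_append, Ne.symm he])
      simp only [List.foldl_cons, if_neg hcond]
      rw [hg]
      simp only [List.length_append, List.length_cons, List.length_nil, Nat.cast_add,
        Nat.cast_one] at hstep
      simpa [List.append_assoc] using hstep

-- gElem at a concrete Nat position is aVal
lemma gElem_at (L : List String) (k : Nat) (h : k < L.length) :
    gElem L ((k : Nat), L[k]) = aVal L k := by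
  have hsl : PySem.List.slice L none (some ((k : Int) + 1)) = L.take (k + 1) := by
    have h1 : ((k : Int) + 1) = ((k + 1 : Nat) : Int) := by push_cast; ring
    rw [h1, PySem.List.slice_to_natCast]
  simp only [gElem, aVal, PySem.List.count_eq, hsl, List.getD_eq_getElem?_getD,
    List.getElem?_eq_getElem h, Option.getD_some]

-- A's result is the map of aVal over the positions
lemma A_eq_map (L : List String) :
    generate_unique_codes L = (List.range L.length).map (aVal L) := by
  unfold generate_unique_codes
  have h := loopA L L [] PySem.Dict.empty [] (by simp)
    (fun b _ => by simp [PySem.Dict.getD_empty])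
  simp only [List.length_nil, Nat.cast_zero, List.nil_append] at h
  rw [h]
  apply List.ext_getElem?
  intro k
  rw [List.getElem?_map, List.getElem?_map, PySem.List.getElem?_enumerate]
  by_cases hk : k < L.length
  · rw [List.getElem?_eq_getElem hk, List.getElem?_range hk]
    simp only [Option.map_some, Option.some.injEq, zero_add]
    exact gElem_at L k hk
  · rw [List.getElem?_eq_none (by omega), List.getElem?_eq_none (by simpa using hk)]
    rfl

-- ---------- positions of b in L, starting index s ----------
def posIs (L : List String) (b : String) (s : Int) : List Int :=
  ((PySem.List.enumerate L s).filter (fun p => p.2 == b)).map (fun p => p.1)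

lemma posIs_getElem? (b : String) : ∀ (L : List String) (s : Int) (j : Nat) (i : Int),
    (posIs L b s)[j]? = some i →
    ∃ k : Nat, i = s + k ∧ ∃ hk : k < L.length, L[k] = b ∧ (L.take (k + 1)).count b = j + 1 := by
  intro L
  induction L with
  | nil => intro s j i h; simp [posIs, PySem.List.enumerate_nil] at h
  | cons a t ih =>
    intro s j i h
    by_cases hab : a = b
    · subst hab
      simp only [posIs, PySem.List.enumerate_cons, List.filter_cons, beq_self_eq_true,
        if_true, List.map_cons] at h
      match j, h with
      | 0, h =>
        simp only [List.getElem?_cons_zero, Option.some.injEq] at h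
        exact ⟨0, by omega, by simp, rfl, by simp⟩
      | j + 1, h =>
        simp only [List.getElem?_cons_succ] at h
        obtain ⟨k, hik, hk, hkb, hcnt⟩ := ih (s + 1) j i h
        refine ⟨k + 1, by omega, by simpa using hk, by simpa using hkb, ?_⟩
        simp only [List.take_succ_cons, List.count_cons_self]
        omega
    · simp only [posIs, PySem.List.enumerate_cons, List.filter_cons,
        beq_iff_eq, if_neg hab, List.map_cons] at h
      obtain ⟨k, hik, hk, hkb, hcnt⟩ := ih (s + 1) j i h
      refine ⟨k + 1, by omega, by simpa using hk, by simpa using hkb, ?_⟩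
      rw [List.take_succ_cons, List.count_cons_of_ne (by exact hab)]
      exact hcnt

lemma posIs_length (b : String) : ∀ (L : List String) (s : Int),
    (posIs L b s).length = L.count b := by
  intro L
  induction L with
  | nil => intro s; simp [posIs, PySem.List.enumerate_nil]
  | cons a t ih =>
    intro s
    by_cases hab : a = b
    · subst hab
      simp only [posIs, PySem.List.enumerate_cons, List.filter_cons, beq_self_eq_true,
        if_true, List.map_cons, List.length_cons, List.count_cons_self]
      rw [show ((PySem.List.enumerate t (s+1)).filter (fun p => p.2 == a)).map (fun p => p.1) = posIs t a (s+1) from rfl, ih]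
    · simp only [posIs, PySem.List.enumerate_cons, List.filter_cons, beq_iff_eq, if_neg hab]
      rw [show ((PySem.List.enumerate t (s+1)).filter (fun p => p.2 == b)).map (fun p => p.1) = posIs t b (s+1) from rfl, ih,
        List.count_cons_of_ne (by exact hab)]

lemma mem_posIs (L : List String) (b : String) (s : Int) (i : Int) :
    i ∈ posIs L b s ↔ ∃ k : Nat, ∃ hk : k < L.length, i = s + k ∧ L[k] = b := by
  simp only [posIs, List.mem_map, List.mem_filter, PySem.List.mem_enumerate_iff]
  constructor
  · rintro ⟨p, ⟨⟨k, hk, rfl⟩, hb⟩, rfl⟩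
    exact ⟨k, hk, rfl, by simpa using hb⟩
  · rintro ⟨k, hk, rfl, hb⟩
    exact ⟨(s + k, L[k]), ⟨⟨k, hk, rfl⟩, by simpa using hb⟩, rfl⟩

-- ---------- the dict B builds ----------
lemma pos_getD (L : List String) (c : String) :
    ((PySem.List.enumerate L 0).foldl (fun d p => d.modify p.2 [] (fun l => l ++ [p.1]))
      (PySem.Dict.empty : PySem.Dict String (List Int))).getD c [] = posIs L c 0 := by
  have h : (PySem.List.enumerate L 0).foldl (fun d p => d.modify p.2 [] (fun l => l ++ [p.1]))
      (PySem.Dict.empty : PySem.Dict String (List Int))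
      = ((PySem.List.enumerate L 0).map (fun p => (p.2, p.1))).foldl
          (fun d q => d.modify q.1 [] (fun l => l ++ [q.2])) PySem.Dict.empty := by
    rw [List.foldl_map]
  rw [h, PySem.Dict.getD_foldl_modify_append, PySem.Dict.getD_empty, List.nil_append,
    List.filter_map, List.map_map]
  rfl

lemma pos_items (L : List String) :
    ((PySem.List.enumerate L 0).foldl (fun d p => d.modify p.2 [] (fun l => l ++ [p.1]))
      (PySem.Dict.empty : PySem.Dict String (List Int))).items
      = (PySem.Set.ofList L).map (fun k => (k, posIs L k 0)) := by
  have h : (PySem.List.enumerate L 0).foldl (fun d p => d.modify p.2 [] (fun l => l ++ [p.1]))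
      (PySem.Dict.empty : PySem.Dict String (List Int))
      = (PySem.List.enumerate L 0).foldl
          (fun d p => d.modify ((fun q : Int × String => q.2) p) [] ((fun (_ : Int × String) l => l ++ [p.1]) p)) PySem.Dict.empty := rfl
  have hnd : ((PySem.List.enumerate L 0).foldl (fun d p => d.modify p.2 [] (fun l => l ++ [p.1]))
      (PySem.Dict.empty : PySem.Dict String (List Int))).keys.Nodup := by
    rw [h]
    exact PySem.Dict.nodup_keys_foldl_modify_key _ _ _ _ _ PySem.Dict.nodup_keys_empty
  have hkeys : ((PySem.List.enumerate L 0).foldl (fun d p => d.modify p.2 [] (fun l => l ++ [p.1]))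
      (PySem.Dict.empty : PySem.Dict String (List Int))).keys = PySem.Set.ofList L := by
    rw [h, PySem.Dict.keys_foldl_modify_key]
    rw [PySem.Dict.keys_empty, PySem.Set.update_nil_left, PySem.List.map_snd_enumerate]
  rw [PySem.Dict.items_eq_map_keys _ hnd [], hkeys]
  exact List.map_congr_left (fun k _ => by rw [pos_getD])

-- ---------- generic write-fold lemmas ----------
lemma foldl_set_notmem (i : Nat) : ∀ (ws : List (Int × String)) (o : List (Option String)),
    (∀ w ∈ ws, 0 ≤ w.1) → (∀ w ∈ ws, w.1 ≠ (i : Int)) →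
    (ws.foldl (fun o w => PySem.List.pySetD o w.1 (some w.2)) o)[i]? = o[i]? := by
  intro ws
  induction ws with
  | nil => intro o _ _; rfl
  | cons w t ih =>
    intro o hnn hne
    rw [List.foldl_cons, ih _ (fun w hw => hnn w (List.mem_cons_of_mem _ hw))
      (fun w hw => hne w (List.mem_cons_of_mem _ hw))]
    rw [PySem.List.pySetD_of_nonneg _ _ (hnn w List.mem_cons_self)]
    apply List.getElem?_set_ne
    intro hcontra
    exact hne w List.mem_cons_self (by
      have := hnn w List.mem_cons_self
      omega)

lemma foldl_set_mem (i : Nat) (v : String) : ∀ (ws : List (Int × String)) (o : List (Option String)),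
    i < o.length →
    (∀ w ∈ ws, 0 ≤ w.1) →
    (∃ w ∈ ws, w.1 = (i : Int)) →
    (∀ w ∈ ws, w.1 = (i : Int) → w.2 = v) →
    (ws.foldl (fun o w => PySem.List.pySetD o w.1 (some w.2)) o)[i]? = some (some v) := by
  intro ws
  induction ws with
  | nil => intro o _ _ hex _; exact absurd hex (by simp)
  | cons w t ih =>
    intro o hi hnn hex hval
    rw [List.foldl_cons]
    by_cases hrest : ∃ w' ∈ t, w'.1 = (i : Int)
    · exact ih _ (by rw [PySem.List.length_pySetD]; exact hi)
        (fun w hw => hnn w (List.mem_cons_of_mem _ hw)) hrest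
        (fun w hw => hval w (List.mem_cons_of_mem _ hw))
    · have hw1 : w.1 = (i : Int) := by
        obtain ⟨w', hw', he⟩ := hex
        rcases List.mem_cons.1 hw' with rfl | hw'
        · exact he
        · exact absurd ⟨w', hw', he⟩ hrest
      have hw2 : w.2 = v := hval w List.mem_cons_self hw1
      rw [foldl_set_notmem i t _ (fun w hw => hnn w (List.mem_cons_of_mem _ hw))
        (fun w' hw' he => hrest ⟨w', hw', he⟩)]
      rw [PySem.List.pySetD_of_nonneg _ _ (hnn w List.mem_cons_self), hw1, hw2]
      simp only [Int.toNat_natCast]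
      exact List.getElem?_set_self hi

-- ---------- the writes of one key ----------
def writes (L : List String) (k : String) : List (Int × String) :=
  if (posIs L k 0).length = 1 ∨ PySem.Str.strip k = "" then (posIs L k 0).map (fun i => (i, k))
  else (PySem.List.enumerate (posIs L k 0) 1).map (fun p => (p.2, k ++ "-" ++ pad2 p.1))

lemma writes_fst (L : List String) (k : String) :
    (writes L k).map (fun w => w.1) = posIs L k 0 := by
  unfold writes
  split
  · rw [List.map_map]; simp [Function.comp_def]
  · rw [List.map_map]
    exact PySem.List.map_snd_enumerate _ _

lemma writes_fold (L : List String) (k : String) (o : List (Option String)) :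
    (if (posIs L k 0).length = 1 ∨ PySem.Str.strip k = "" then
        (posIs L k 0).foldl (fun o i => PySem.List.pySetD o i (some k)) o
      else
        (PySem.List.enumerate (posIs L k 0) 1).foldl
          (fun o p => PySem.List.pySetD o p.2 (some (k ++ "-" ++ pad2 p.1))) o)
    = (writes L k).foldl (fun o w => PySem.List.pySetD o w.1 (some w.2)) o := by
  unfold writes
  split
  · rw [List.foldl_map]
  · rw [List.foldl_map]

lemma foldl_congr' {A B : Type} (l : List B) (f g : A → B → A) (h : ∀ a b, f a b = g a b) (init : A) :
    l.foldl f init = l.foldl g init := by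
  have he : f = g := funext fun a => funext fun b => h a b
  rw [he]

lemma mem_posIs_nonneg (L : List String) (k : String) (i : Int) (h : i ∈ posIs L k 0) : 0 ≤ i := by
  obtain ⟨m, hm, rfl, _⟩ := (mem_posIs L k 0 i).1 h
  omega

lemma writes_nonneg (L : List String) (k : String) (w : Int × String) (hw : w ∈ writes L k) : 0 ≤ w.1 := by
  have h : w.1 ∈ posIs L k 0 := by
    rw [← writes_fst L k]
    exact List.mem_map_of_mem hw
  exact mem_posIs_nonneg L k _ h

-- a write of key k' at position i forces k' = L[i]
lemma writes_key_at (L : List String) (k' : String) (i : Nat) (hi : i < L.length)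
    (w : Int × String) (hw : w ∈ writes L k') (hwi : w.1 = (i : Int)) : L[i] = k' := by
  have h : w.1 ∈ posIs L k' 0 := by
    rw [← writes_fst L k']
    exact List.mem_map_of_mem hw
  obtain ⟨m, hm, he, hb⟩ := (mem_posIs L k' 0 w.1).1 h
  have : m = i := by omega
  subst this
  exact hb

-- any write at position i has value aVal L i
lemma writes_val (L : List String) (k' : String) (i : Nat) (hi : i < L.length)
    (w : Int × String) (hw : w ∈ writes L k') (hwi : w.1 = (i : Int)) : w.2 = aVal L i := by
  have hbk : L[i] = k' := writes_key_at L k' i hi w hw hwi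
  have hb : L.getD i "" = k' := by
    rw [List.getD_eq_getElem?_getD, List.getElem?_eq_getElem hi, Option.getD_some, hbk]
  have hcountL : (posIs L k' 0).length = L.count k' := posIs_length k' L 0
  have hone : 0 < L.count k' := List.count_pos_iff.2 (hbk ▸ List.getElem_mem hi)
  unfold writes at hw
  by_cases hc : (posIs L k' 0).length = 1 ∨ PySem.Str.strip k' = ""
  · rw [if_pos hc] at hw
    obtain ⟨x, hx, hxe⟩ := List.mem_map.1 hw
    have hw2 : w.2 = k' := by rw [← hxe]
    have hA : L.count k' ≤ 1 ∨ PySem.Str.strip k' = "" := by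
      rcases hc with h | h
      · left; omega
      · right; exact h
    simp only [aVal, hb]
    rw [hw2, if_pos hA]
  · rw [if_neg hc] at hw
    push_neg at hc
    obtain ⟨p, hp, hpe⟩ := List.mem_map.1 hw
    obtain ⟨j, hj, rfl⟩ := (PySem.List.mem_enumerate_iff _ _ _).1 hp
    have hwi' : (posIs L k' 0)[j] = ((i : Nat) : Int) := by
      rw [← hpe] at hwi; exact hwi
    have hji : (posIs L k' 0)[j]? = some ((i : Nat) : Int) := by
      rw [List.getElem?_eq_getElem hj, hwi']
    obtain ⟨m, hmi, hm, hmb, hcnt⟩ := posIs_getElem? k' L 0 j _ hji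
    have hmi' : m = i := by omega
    subst hmi'
    have hA : ¬ (L.count k' ≤ 1 ∨ PySem.Str.strip k' = "") := by
      push_neg
      exact ⟨by omega, hc.2⟩
    have hval2 : w.2 = k' ++ "-" ++ pad2 (1 + (j : Int)) := by rw [← hpe]
    simp only [aVal, hb]
    rw [hval2, if_neg hA]
    congr 2
    rw [hcnt]
    push_cast
    ring

-- a write exists at every position
lemma writes_exists (L : List String) (i : Nat) (hi : i < L.length) :
    ∃ w ∈ (PySem.Set.ofList L).flatMap (writes L), w.1 = (i : Int) := by
  set k := L[i] with hk
  have hkL : k ∈ PySem.Set.ofList L := by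
    rw [PySem.Set.mem_ofList]
    exact List.getElem_mem hi
  have hmem : (i : Int) ∈ posIs L k 0 := by
    rw [mem_posIs]
    exact ⟨i, hi, by omega, rfl⟩
  have : ∃ w ∈ writes L k, w.1 = (i : Int) := by
    have : (i : Int) ∈ (writes L k).map (fun w => w.1) := by
      rw [writes_fst]; exact hmem
    obtain ⟨w, hw, he⟩ := List.mem_map.1 this
    exact ⟨w, hw, he⟩
  obtain ⟨w, hw, he⟩ := this
  exact ⟨w, List.mem_flatMap.2 ⟨k, hkL, hw⟩, he⟩

-- B's result is the same map of aVal
lemma B_eq_map (L : List String) :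
    generate_unique_codes_alt L = (List.range L.length).map (aVal L) := by
  unfold generate_unique_codes_alt
  simp only [List.map_id']
  rw [pos_items, List.foldl_map]
  have hbody : ∀ (o : List (Option String)) (k : String),
      (if (k, posIs L k 0).2.length = 1 ∨ PySem.Str.strip (k, posIs L k 0).1 = "" then
        (k, posIs L k 0).2.foldl (fun o i => PySem.List.pySetD o i (some (k, posIs L k 0).1)) o
      else
        (PySem.List.enumerate (k, posIs L k 0).2 1).foldl
          (fun o p => PySem.List.pySetD o p.2 (some ((k, posIs L k 0).1 ++ "-" ++ pad2 p.1))) o)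
      = (writes L k).foldl (fun o w => PySem.List.pySetD o w.1 (some w.2)) o := fun o k =>
    writes_fold L k o
  rw [foldl_congr' _ _ _ hbody, ← List.foldl_flatMap]
  have hfin : ((PySem.Set.ofList L).flatMap (writes L)).foldl
      (fun o w => PySem.List.pySetD o w.1 (some w.2)) (List.replicate L.length none)
      = (List.range L.length).map (fun k => some (aVal L k)) := by
    apply List.ext_getElem?
    intro i
    by_cases hi : i < L.length
    · rw [foldl_set_mem i (aVal L i) _ _
        (by rw [List.length_replicate]; exact hi)
        (fun w hw => by
          obtain ⟨k, _, hwk⟩ := List.mem_flatMap.1 hw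
          exact writes_nonneg L k w hwk)
        (writes_exists L i hi)
        (fun w hw he => by
          obtain ⟨k, _, hwk⟩ := List.mem_flatMap.1 hw
          exact writes_val L k i hi w hwk he)]
      rw [List.getElem?_map, List.getElem?_range hi]
      rfl
    · rw [foldl_set_notmem i _ _
        (fun w hw => by
          obtain ⟨k, _, hwk⟩ := List.mem_flatMap.1 hw
          exact writes_nonneg L k w hwk)
        (fun w hw => by
          obtain ⟨k, _, hwk⟩ := List.mem_flatMap.1 hw
          have h : w.1 ∈ posIs L k 0 := by
            rw [← writes_fst L k]
            exact List.mem_map_of_mem hwk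
          obtain ⟨m, hm, he, _⟩ := (mem_posIs L k 0 w.1).1 h
          intro hcontra
          omega)]
      rw [List.getElem?_eq_none (by rw [List.length_replicate]; omega),
        List.getElem?_eq_none (by rw [List.length_map, List.length_range]; omega)]
  rw [hfin, List.map_map]
  rfl

-- ===== VERDICT (by name: the statement is the Claim_ definition above) =====
theorem generate_unique_codes_spec : Claim_equal_generate_unique_codes := by
  intro L _
  show generate_unique_codes L = generate_unique_codes_alt L
  rw [A_eq_map, B_eq_map]
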